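-- pv_equiv track=rewrite | github.com/maciejnalewajka/Python | EXS/exam_2015.py | elwise
-- ===== SOURCE A (Python) =====
-- def elwise(L1, L2):
--     size = len(L2)
--     if(len(L1) > len(L2)):
--         size = len(L1)
--     i = 0
--     lista = []
--     while(size > i):
--         if(len(L1) > i):
--             e1 = L1[i]
--         else:
--             e1 = 1
--         if(len(L2) > i):
--             e2 = L2[i]
--         else:
--             e2 = 1
--         lista.append(e1 * e2)
--         i += 1
--     return lista
-- ===== SOURCE B (Python) =====
-- def elwise(L1, L2):
--     m = min(len(L1), len(L2))
--     prefix = [L1[i] * L2[i] for i in range(m)]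
--     tail = L1[m:] if len(L1) > len(L2) else L2[m:]
--     return prefix + [x * 1 for x in tail]
-- ===== Notes on version B (the rewrite author's own statement) =====
-- stated objective: simpler
-- what changed: Replaces the index-guarded while loop over max(len) with a two-phase decomposition: a comprehension over the overlapping prefix plus the surplus tail (each element times 1) appended.
import Mathlib
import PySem

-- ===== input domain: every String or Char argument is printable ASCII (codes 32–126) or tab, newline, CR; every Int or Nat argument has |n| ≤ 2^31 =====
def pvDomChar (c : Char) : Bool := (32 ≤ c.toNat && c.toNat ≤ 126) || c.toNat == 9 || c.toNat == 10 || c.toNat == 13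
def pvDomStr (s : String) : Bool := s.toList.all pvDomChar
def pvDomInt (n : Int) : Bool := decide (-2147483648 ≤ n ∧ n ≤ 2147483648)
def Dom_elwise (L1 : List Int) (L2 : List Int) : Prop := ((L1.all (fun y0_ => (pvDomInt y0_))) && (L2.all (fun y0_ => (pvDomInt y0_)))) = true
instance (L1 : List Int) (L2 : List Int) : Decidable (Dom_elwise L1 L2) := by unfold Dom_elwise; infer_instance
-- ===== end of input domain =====

-- B replaces A's index-guarded while loop with a two-phase decomposition (overlap products, then surplus tail ×1); objective: simpler.

-- ===== PORT A =====
def elwise (L1 : List Int) (L2 : List Int) : List Int :=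
  let size := if L1.length > L2.length then L1.length else L2.length
  (List.range size).foldl (fun lista i =>
    let e1 := if L1.length > i then L1.getD i 0 else 1
    let e2 := if L2.length > i then L2.getD i 0 else 1
    lista ++ [e1 * e2]) []

-- ===== PORT B =====
def elwise_alt (L1 : List Int) (L2 : List Int) : List Int :=
  let m := min L1.length L2.length
  let pre := (List.range m).map (fun i => L1.getD i 0 * L2.getD i 0)
  let tail := if L1.length > L2.length then L1.drop m else L2.drop m
  pre ++ tail.map (fun x => x * 1)

-- ===== PRECONDITION & SPEC =====
def Spec_elwise (L1 : List Int) (L2 : List Int) (out : List Int) : Prop := out = elwise_alt L1 L2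
instance (L1 : List Int) (L2 : List Int) (out : List Int) : Decidable (Spec_elwise L1 L2 out) := by unfold Spec_elwise; infer_instance

-- ===== CLAIM (what is proved, stated in full; the proofs are below) =====
def Claim_equal_elwise : Prop := ∀ (L1 : List Int) (L2 : List Int), Dom_elwise L1 L2 → Spec_elwise L1 L2 (elwise L1 L2)

-- ===== LEMMAS AND PROOFS =====

theorem elwise_eq_map (L1 L2 : List Int) :
    elwise L1 L2 = (List.range (if L1.length > L2.length then L1.length else L2.length)).map
      (fun i => (if L1.length > i then L1.getD i 0 else 1) * (if L2.length > i then L2.getD i 0 else 1)) := by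
  simpa [elwise] using
    PySem.List.foldl_append_singleton_eq_map
      (f := fun i => (if L1.length > i then L1.getD i 0 else 1) * (if L2.length > i then L2.getD i 0 else 1))
      (l := List.range (if L1.length > L2.length then L1.length else L2.length)) (acc := [])

-- ===== VERDICT (by name: the statement is the Claim_ definition above) =====
theorem elwise_spec : Claim_equal_elwise := by
  intro L1 L2 _
  unfold Spec_elwise
  rw [elwise_eq_map]
  by_cases hc : L1.length > L2.length
  all_goals simp only [elwise_alt, hc, if_pos, if_neg, not_false_iff]
  all_goals apply List.ext_getElem
  · simp
    try omega
  · intro i h1 h2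
    simp only [List.length_map, List.length_range] at h1
    simp only [List.getElem_map, List.getElem_range]
    rcases lt_or_ge i (min L1.length L2.length) with hlt | hge
    · rw [List.getElem_append_left (by simp; omega)]
      have h1' : L1.length > i := by omega
      have h2' : L2.length > i := by omega
      simp [h1', h2']
    · rw [List.getElem_append_right (by simp; omega)]
      simp only [List.getElem_map, List.getElem_drop, List.length_map, List.length_range]
      have h1' : L1.length > i := by omega
      have h2' : ¬ (L2.length > i) := by omega
      simp [h1', h2']
      congr 1
      omega
  · simp
    try omega
  · intro i h1 h2
    simp only [List.length_map, List.length_range] at h1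
    simp only [List.getElem_map, List.getElem_range]
    rcases lt_or_ge i (min L1.length L2.length) with hlt | hge
    · rw [List.getElem_append_left (by simp; omega)]
      have h1' : L1.length > i := by omega
      have h2' : L2.length > i := by omega
      simp [h1', h2']
    · rw [List.getElem_append_right (by simp; omega)]
      simp only [List.getElem_map, List.getElem_drop, List.length_map, List.length_range]
      have h2' : L2.length > i := by omega
      by_cases h1' : L1.length > i
      · omega
      · simp [h1', h2']
        congr 1
        omega
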